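-- pv_equiv track=rewrite | github.com/ldg1036/AI_TF_CODEREVIEW | backend/core/autofix_apply_engine.py | _occurrence_count
-- ===== SOURCE A (Python) =====
-- from typing import Any, Dict, List, Optional, Tuple
--
-- def _occurrence_count(lines: List[str], before_expected: str, after_expected: str) -> int:
--     if not before_expected and not after_expected:
--         return 1
--     count = 0
--     for idx in range(len(lines) + 1):
--         before_actual = lines[idx - 1] if idx > 0 and (idx - 1) < len(lines) else ""
--         after_actual = lines[idx] if idx < len(lines) else ""
--         before_ok = (not before_expected) or (before_actual == before_expected)
--         after_ok = (not after_expected) or (after_actual == after_expected)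
--         if before_ok and after_ok:
--             count += 1
--     return count
-- ===== SOURCE B (Python) =====
-- def _occurrence_count(lines, before_expected, after_expected):
--     if not before_expected and not after_expected:
--         return 1
--     padded = [""] + lines + [""]
--     counts = {}
--     for pair in zip(padded, padded[1:]):
--         counts[pair] = counts.get(pair, 0) + 1
--     return sum(c for (x, y), c in counts.items()
--                if (not before_expected or x == before_expected)
--                and (not after_expected or y == after_expected))
-- ===== Notes on version B (the rewrite author's own statement) =====
-- stated objective: alternative
-- what changed: Instead of A's indexed loop over n+1 gap positions with guarded lookups, B pads the list with sentinel empty lines, builds a dict histogram of its adjacent pairs in one pass, and returns the sum of the counts of the distinct pairs whose components match the expected context.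
import Mathlib
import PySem

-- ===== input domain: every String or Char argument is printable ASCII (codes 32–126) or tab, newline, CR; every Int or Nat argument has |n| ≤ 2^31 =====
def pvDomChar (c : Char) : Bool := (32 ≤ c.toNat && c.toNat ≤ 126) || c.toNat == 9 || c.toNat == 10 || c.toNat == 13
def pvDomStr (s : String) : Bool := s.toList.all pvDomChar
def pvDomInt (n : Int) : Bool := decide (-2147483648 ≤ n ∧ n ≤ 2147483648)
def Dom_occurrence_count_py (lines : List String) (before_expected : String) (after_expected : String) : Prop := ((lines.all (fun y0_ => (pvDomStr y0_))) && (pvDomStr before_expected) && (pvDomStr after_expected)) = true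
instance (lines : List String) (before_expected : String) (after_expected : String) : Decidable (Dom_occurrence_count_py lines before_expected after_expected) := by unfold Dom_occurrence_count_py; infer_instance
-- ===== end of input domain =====

-- B replaces A's indexed sentinel-gap loop by building a histogram (dict) of the
-- adjacent pairs of the sentinel-padded list once, then summing the counts of the
-- distinct pairs whose components match; objective: alternative.

-- ===== PORT A =====
def occurrence_count_py (lines : List String) (before_expected : String) (after_expected : String) : Int :=
  if (before_expected == "") && (after_expected == "") then 1
  else
    (List.range (lines.length + 1)).foldl (fun count idx =>
      let before_actual := if decide (idx > 0) && decide (idx - 1 < lines.length) then lines.getD (idx - 1) "" else ""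
      let after_actual := if decide (idx < lines.length) then lines.getD idx "" else ""
      let before_ok := (before_expected == "") || (before_actual == before_expected)
      let after_ok := (after_expected == "") || (after_actual == after_expected)
      if before_ok && after_ok then count + 1 else count) 0

-- ===== PORT B =====
def occurrence_count_py_alt (lines : List String) (before_expected : String) (after_expected : String) : Int :=
  if (before_expected == "") && (after_expected == "") then 1
  else
    let padded := [""] ++ lines ++ [""]
    let counts := (padded.zip padded.tail).foldl
      (fun d p => PySem.Dict.modify d p 0 (· + 1)) PySem.Dict.empty
    counts.items.foldl
      (fun acc kv =>
        if ((before_expected == "") || (kv.1.1 == before_expected)) &&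
           ((after_expected == "") || (kv.1.2 == after_expected))
        then acc + kv.2 else acc) 0

-- ===== PRECONDITION & SPEC =====
def Spec_occurrence_count_py (lines : List String) (before_expected : String) (after_expected : String) (out : Int) : Prop := out = occurrence_count_py_alt lines before_expected after_expected
instance (lines : List String) (before_expected : String) (after_expected : String) (out : Int) : Decidable (Spec_occurrence_count_py lines before_expected after_expected out) := by unfold Spec_occurrence_count_py; infer_instance

-- ===== CLAIM (what is proved, stated in full; the proofs are below) =====
def Claim_equal_occurrence_count_py : Prop := ∀ (lines : List String) (before_expected : String) (after_expected : String), Dom_occurrence_count_py lines before_expected after_expected → Spec_occurrence_count_py lines before_expected after_expected (occurrence_count_py lines before_expected after_expected)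

-- ===== LEMMAS AND PROOFS =====

-- A's loop predicate at gap position idx (the port's loop body, let-reduced)
def pFull (lines : List String) (b a : String) (idx : Nat) : Bool :=
  ((b == "") || ((if decide (idx > 0) && decide (idx - 1 < lines.length) then lines.getD (idx - 1) "" else "") == b)) &&
  ((a == "") || ((if decide (idx < lines.length) then lines.getD idx "" else "") == a))

-- B's pair predicate
def qPair (b a : String) (p : String × String) : Bool :=
  ((b == "") || (p.1 == b)) && ((a == "") || (p.2 == a))

-- appending the "" sentinel does not change getD with default ""
lemma getD_append_sentinel (L : List String) (i : Nat) :
    (L ++ [""]).getD i "" = L.getD i "" := by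
  by_cases h : i < L.length
  · exact List.getD_append L [""] "" i h
  · rw [Nat.not_lt] at h
    rw [List.getD_append_right L [""] "" i h, List.getD_eq_default L "" h]
    rcases hj : i - L.length with _ | n <;> rfl

-- the guarded lookup in A equals an unguarded getD with default ""
lemma guardA_after (lines : List String) (idx : Nat) :
    (if decide (idx < lines.length) then lines.getD idx "" else "") = lines.getD idx "" := by
  split_ifs with h
  · rfl
  · exact (List.getD_eq_default lines "" (by simpa using h)).symm

-- A's loop predicate is B's pair predicate on the padded list's adjacent gap
lemma pFull_eq_qPair (lines : List String) (b a : String) (idx : Nat) :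
    pFull lines b a idx =
      qPair b a ((([""] ++ lines ++ [""]).getD idx "",
                  ([""] ++ lines ++ [""]).getD (idx + 1) "")) := by
  have hafter : ([""] ++ lines ++ [""]).getD (idx + 1) "" = lines.getD idx "" := by
    show (("" :: (lines ++ [""])).getD (idx + 1) "") = _
    rw [List.getD_cons_succ, getD_append_sentinel]
  cases idx with
  | zero =>
    simp only [pFull, qPair, hafter, guardA_after]
    rfl
  | succ i =>
    have hbefore : ([""] ++ lines ++ [""]).getD (i + 1) "" = lines.getD i "" := by
      show (("" :: (lines ++ [""])).getD (i + 1) "") = _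
      rw [List.getD_cons_succ, getD_append_sentinel]
    have hbeforeA : (if decide (i + 1 > 0) && decide (i + 1 - 1 < lines.length)
        then lines.getD (i + 1 - 1) "" else "") = lines.getD i "" := by
      simp only [Nat.add_sub_cancel, gt_iff_lt, Nat.succ_pos, decide_true, Bool.true_and]
      split_ifs with h
      · rfl
      · exact (List.getD_eq_default lines "" (by simpa using h)).symm
    simp only [pFull, qPair, hafter, guardA_after, hbefore, hbeforeA]

-- counting matching gap indices = counting matching adjacent pairs of the padded list
lemma countP_range_zip (q : String × String → Bool) :
    ∀ (P : List String),
      (List.range (P.length - 1)).countP (fun i => q (P.getD i "", P.getD (i + 1) "")) =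
        (P.zip P.tail).countP q := by
  intro P
  induction P with
  | nil => simp
  | cons x P ih =>
    cases P with
    | nil => simp
    | cons y P' =>
      have hlen : (x :: y :: P').length - 1 = (y :: P').length := by simp
      rw [hlen, List.length_cons, List.range_succ_eq_map, List.countP_cons,
        List.countP_map]
      have hshift : ((fun i => q ((x :: y :: P').getD i "", (x :: y :: P').getD (i + 1) "")) ∘ Nat.succ) =
          (fun i => q ((y :: P').getD i "", (y :: P').getD (i + 1) "")) := by
        funext i; simp
      have hlen' : P'.length = (y :: P').length - 1 := by simp
      rw [hshift, hlen', ih]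
      simp [List.countP_cons]

-- a fold adding the values of entries whose key satisfies q is a filtered sum
lemma foldl_if_add (q : String × String → Bool) :
    ∀ (L : List ((String × String) × Int)) (c : Int),
      L.foldl (fun acc kv => if q kv.1 then acc + kv.2 else acc) c =
        c + ((L.filter (fun kv => q kv.1)).map Prod.snd).sum := by
  intro L
  induction L with
  | nil => intro c; simp
  | cons kv L ih =>
    intro c
    by_cases h : q kv.1
    · simp [List.foldl_cons, h, ih, add_assoc]
    · simp [List.foldl_cons, h, ih]

-- List.count, canonicalised over the (lawful) BEq instance
lemma count_canon {α : Type} [DecidableEq α] [inst : BEq α] [LawfulBEq α]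
    (k : α) (xs : List α) : List.count k xs = xs.countP (fun x => decide (x = k)) := by
  rw [List.count_eq_countP]
  exact List.countP_congr (fun x _ => by simp)

-- summing a histogram's filtered counts = countP over the underlying list
lemma sum_filter_ofList_count (q : String × String → Bool) (xs : List (String × String)) :
    ((((PySem.Set.ofList xs).filter q).map (fun k => (xs.count k : Int)))).sum =
      (xs.countP q : Int) := by
  have hperm : List.Perm (PySem.Set.ofList xs) xs.dedup := by
    rw [List.perm_ext_iff_of_nodup (PySem.Set.nodup_ofList xs) xs.nodup_dedup]
    intro p
    rw [PySem.Set.mem_ofList, List.mem_dedup]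
  have hperm2 := ((hperm.filter q).map (fun k => (xs.count k : Int))).sum_eq
  rw [hperm2]
  have hcast : ((xs.dedup.filter q).map (fun k => (xs.count k : Int))).sum =
      (((xs.dedup.filter q).map (fun k => xs.count k)).sum : Int) := by
    rw [Nat.cast_list_sum, List.map_map]; rfl
  rw [hcast]
  have hsum := List.sum_map_count_dedup_filter_eq_countP q xs
  simp only [count_canon] at hsum ⊢
  rw [hsum]

theorem occurrence_count_py_spec : Claim_equal_occurrence_count_py := by
  intro lines b a _
  show occurrence_count_py lines b a = occurrence_count_py_alt lines b a
  rw [occurrence_count_py, occurrence_count_py_alt]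
  by_cases hba : (b == "") && (a == "")
  · rw [if_pos hba, if_pos hba]
  · rw [if_neg hba, if_neg hba]
    have hA : (List.range (lines.length + 1)).foldl (fun count idx =>
        let before_actual := if decide (idx > 0) && decide (idx - 1 < lines.length) then lines.getD (idx - 1) "" else ""
        let after_actual := if decide (idx < lines.length) then lines.getD idx "" else ""
        let before_ok := (b == "") || (before_actual == b)
        let after_ok := (a == "") || (after_actual == a)
        if before_ok && after_ok then count + 1 else count) 0 =
        0 + (((List.range (lines.length + 1)).countP (pFull lines b a) : Nat) : Int) := by
      exact PySem.List.foldl_count_if _ _ _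
    rw [hA]
    -- rewrite A's count as countP over adjacent pairs of the padded list
    have hcong : (List.range (lines.length + 1)).countP (pFull lines b a) =
        (List.range (([""] ++ lines ++ [""]).length - 1)).countP
          (fun i => qPair b a (([""] ++ lines ++ [""]).getD i "",
                               ([""] ++ lines ++ [""]).getD (i + 1) "")) := by
      have hlen : ([""] ++ lines ++ [""]).length - 1 = lines.length + 1 := by simp
      rw [hlen]
      exact List.countP_congr (fun i _ => by rw [pFull_eq_qPair lines b a i])
    rw [hcong, countP_range_zip (qPair b a)]
    -- now evaluate B's fold over the counter's items
    show _ = (PySem.Dict.counter (([""] ++ lines ++ [""]).zip ([""] ++ lines ++ [""]).tail)).items.foldl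
      (fun acc kv => if qPair b a kv.1 then acc + kv.2 else acc) 0
    set xs := ([""] ++ lines ++ [""]).zip ([""] ++ lines ++ [""]).tail with hxs
    rw [PySem.Dict.items_counter, foldl_if_add (qPair b a), List.filter_map]
    have hqf : ((fun (kv : (String × String) × Int) => qPair b a kv.1) ∘
        (fun k => (k, (xs.count k : Int)))) = qPair b a := rfl
    rw [hqf, List.map_map]
    have hsnd : (Prod.snd ∘ fun (k : String × String) => (k, (xs.count k : Int))) =
        (fun k => (xs.count k : Int)) := rfl
    rw [hsnd, sum_filter_ofList_count]
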